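-- pv_equiv track=rewrite | github.com/giorek/LLM_Study | code/simple_demo/Hello_LangChain_Prompt.py | find_product_description
-- ===== SOURCE A (Python) =====
-- def find_product_description(product_name: str) -> str:
--     """模拟公司产品的数据库"""
--     product_info = {
--         "Model 3": "具有简洁、动感的外观设计，流线型车身和现代化前脸。定价23.19-33.19万",
--         "Model Y": "在外观上与Model 3相似，但采用了更高的车身和更大的后备箱空间。定价26.39-36.39万",
--         "Model X": "拥有独特的翅子门设计和更加大胆的外观风格。定价89.89-105.89万",
--     }
--     # 处理用户输入：去除空格并转为小写
--     normalized_input = product_name.replace(" ", "").lower()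
--     # 构建一个归一化的产品名到原始产品名的映射
--     normalized_map = {k.replace(" ", "").lower(): k for k in product_info}
--     matched_key = normalized_map.get(normalized_input)
--     if matched_key:
--         return product_info[matched_key]
--     else:
--         return "没有找到这个产品"
-- ===== SOURCE B (Python) =====
-- def find_product_description(product_name: str) -> str:
--     """模拟公司产品的数据库"""
--     NOT_FOUND = "没有找到这个产品"
--     # All products are "Model <variant>": normalize, strip the fixed "model"
--     # prefix, and dispatch on the remaining variant tag — no dict, no key scan.
--     normalized = product_name.replace(" ", "").lower()
--     if not normalized.startswith("model"):
--         return NOT_FOUND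
--     variant = normalized[5:]
--     if variant == "3":
--         return "具有简洁、动感的外观设计，流线型车身和现代化前脸。定价23.19-33.19万"
--     if variant == "y":
--         return "在外观上与Model 3相似，但采用了更高的车身和更大的后备箱空间。定价26.39-36.39万"
--     if variant == "x":
--         return "拥有独特的翅子门设计和更加大胆的外观风格。定价89.89-105.89万"
--     return NOT_FOUND
-- ===== Notes on version B (the rewrite author's own statement) =====
-- stated objective: simpler
-- what changed: Drops the product dict and the normalized-key index entirely: B exploits that every key is 'model'+variant, checks the fixed 'model' prefix once, slices off the variant tag and dispatches on it with an early-return chain.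
import Mathlib
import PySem

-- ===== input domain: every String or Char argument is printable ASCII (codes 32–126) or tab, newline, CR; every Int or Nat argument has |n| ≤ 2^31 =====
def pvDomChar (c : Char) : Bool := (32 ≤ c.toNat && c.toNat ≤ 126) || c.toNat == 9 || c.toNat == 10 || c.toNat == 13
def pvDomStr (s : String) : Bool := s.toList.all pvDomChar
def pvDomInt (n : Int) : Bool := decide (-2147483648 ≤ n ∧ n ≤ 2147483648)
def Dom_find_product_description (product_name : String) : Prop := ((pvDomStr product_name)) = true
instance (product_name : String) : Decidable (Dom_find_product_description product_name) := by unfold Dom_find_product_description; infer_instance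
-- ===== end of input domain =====

-- B drops the product dict and the normalized-key index: every key is "model"+variant after
-- normalization, so B checks the fixed "model" prefix once, slices off the variant tag and
-- dispatches on it with an early-return chain (simpler; same behaviour).

-- ===== PORT A =====
def find_product_description (product_name : String) : String :=
  let product_info : PySem.Dict String String := PySem.Dict.ofList
    [("Model 3", "具有简洁、动感的外观设计，流线型车身和现代化前脸。定价23.19-33.19万"),
     ("Model Y", "在外观上与Model 3相似，但采用了更高的车身和更大的后备箱空间。定价26.39-36.39万"),
     ("Model X", "拥有独特的翅子门设计和更加大胆的外观风格。定价89.89-105.89万")]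
  let normalized_input := PySem.Str.lower (PySem.Str.replace product_name " " "")
  let normalized_map : PySem.Dict String String := PySem.Dict.ofList
    (product_info.keys.map (fun k => (PySem.Str.lower (PySem.Str.replace k " " ""), k)))
  match normalized_map.get? normalized_input with
  | some matched_key =>
      -- 'if matched_key:' — every stored key is a non-empty string, so truthiness = found here
      (product_info.get? matched_key).getD "没有找到这个产品"
  | none => "没有找到这个产品"

-- ===== PORT B =====
def find_product_description_alt (product_name : String) : String :=
  let normalized := PySem.Str.lower (PySem.Str.replace product_name " " "")
  if ¬ (PySem.Str.startswith normalized "model" = true) then "没有找到这个产品"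
  else
    let variant := PySem.Str.slice normalized (some 5) none
    if variant = "3" then "具有简洁、动感的外观设计，流线型车身和现代化前脸。定价23.19-33.19万"
    else if variant = "y" then "在外观上与Model 3相似，但采用了更高的车身和更大的后备箱空间。定价26.39-36.39万"
    else if variant = "x" then "拥有独特的翅子门设计和更加大胆的外观风格。定价89.89-105.89万"
    else "没有找到这个产品"

-- ===== PRECONDITION & SPEC =====
def Spec_find_product_description (product_name : String) (out : String) : Prop := out = find_product_description_alt product_name
instance (product_name : String) (out : String) : Decidable (Spec_find_product_description product_name out) := by unfold Spec_find_product_description; infer_instance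

-- ===== CLAIM (what is proved, stated in full; the proofs are below) =====
def Claim_equal_find_product_description : Prop := ∀ (product_name : String), Dom_find_product_description product_name → Spec_find_product_description product_name (find_product_description product_name)

-- ===== LEMMAS AND PROOFS =====

-- a string that starts with "model" is "model" followed by its [5:] slice
lemma pv_recover (t : String) (v : String)
    (h : PySem.Str.startswith t "model" = true)
    (hv : PySem.Str.slice t (some 5) none = v) :
    t.toList = "model".toList ++ v.toList := by
  rw [PySem.Str.startswith_eq, PySem.Chars.startswith_iff] at h
  obtain ⟨r, hr⟩ := h
  have hs := congrArg String.toList hv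
  have hdrop : PySem.List.slice t.toList (some 5) none = t.toList.drop 5 := by
    rw [PySem.List.slice_from]
    · norm_num; omega
    · norm_num
  rw [PySem.Str.toList_slice, PySem.Chars.slice_eq_listSlice, hdrop] at hs
  rw [← hr] at hs ⊢
  simp at hs
  rw [← hs]

-- the core case analysis, over an arbitrary already-normalized string t
lemma pv_core (t : String) :
    (match (PySem.Dict.ofList
      ((PySem.Dict.ofList
        [("Model 3", "具有简洁、动感的外观设计，流线型车身和现代化前脸。定价23.19-33.19万"),
         ("Model Y", "在外观上与Model 3相似，但采用了更高的车身和更大的后备箱空间。定价26.39-36.39万"),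
         ("Model X", "拥有独特的翅子门设计和更加大胆的外观风格。定价89.89-105.89万")] : PySem.Dict String String).keys.map
          (fun k => (PySem.Str.lower (PySem.Str.replace k " " ""), k))) : PySem.Dict String String).get? t with
     | some matched_key =>
        ((PySem.Dict.ofList
        [("Model 3", "具有简洁、动感的外观设计，流线型车身和现代化前脸。定价23.19-33.19万"),
         ("Model Y", "在外观上与Model 3相似，但采用了更高的车身和更大的后备箱空间。定价26.39-36.39万"),
         ("Model X", "拥有独特的翅子门设计和更加大胆的外观风格。定价89.89-105.89万")] : PySem.Dict String String).get? matched_key).getD "没有找到这个产品"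
     | none => "没有找到这个产品")
    =
    (if ¬ (PySem.Str.startswith t "model" = true) then "没有找到这个产品"
     else
       if PySem.Str.slice t (some 5) none = "3" then "具有简洁、动感的外观设计，流线型车身和现代化前脸。定价23.19-33.19万"
       else if PySem.Str.slice t (some 5) none = "y" then "在外观上与Model 3相似，但采用了更高的车身和更大的后备箱空间。定价26.39-36.39万"
       else if PySem.Str.slice t (some 5) none = "x" then "拥有独特的翅子门设计和更加大胆的外观风格。定价89.89-105.89万"
       else "没有找到这个产品") := by
  by_cases h3 : t = "model3"
  · subst h3; decide
  by_cases hy : t = "modely"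
  · subst hy; decide
  by_cases hx : t = "modelx"
  · subst hx; decide
  -- t is none of the three normalized keys: both sides are the not-found string
  have hnone : (PySem.Dict.ofList
      ((PySem.Dict.ofList
        [("Model 3", "具有简洁、动感的外观设计，流线型车身和现代化前脸。定价23.19-33.19万"),
         ("Model Y", "在外观上与Model 3相似，但采用了更高的车身和更大的后备箱空间。定价26.39-36.39万"),
         ("Model X", "拥有独特的翅子门设计和更加大胆的外观风格。定价89.89-105.89万")] : PySem.Dict String String).keys.map
          (fun k => (PySem.Str.lower (PySem.Str.replace k " " ""), k))) : PySem.Dict String String).get? t = none := by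
    have hmap : (PySem.Dict.ofList
      ((PySem.Dict.ofList
        [("Model 3", "具有简洁、动感的外观设计，流线型车身和现代化前脸。定价23.19-33.19万"),
         ("Model Y", "在外观上与Model 3相似，但采用了更高的车身和更大的后备箱空间。定价26.39-36.39万"),
         ("Model X", "拥有独特的翅子门设计和更加大胆的外观风格。定价89.89-105.89万")] : PySem.Dict String String).keys.map
          (fun k => (PySem.Str.lower (PySem.Str.replace k " " ""), k))) : PySem.Dict String String)
      = PySem.Dict.mk [("model3", "Model 3"), ("modely", "Model Y"), ("modelx", "Model X")] := by decide
    rw [hmap]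
    simp [PySem.Dict.get?, Ne.symm h3, Ne.symm hy, Ne.symm hx]
  rw [hnone]
  by_cases hpre : PySem.Str.startswith t "model" = true
  · rw [if_neg (not_not.mpr hpre)]
    by_cases h3' : PySem.Str.slice t (some 5) none = "3"
    · exact absurd (String.toList_inj.mp (by rw [pv_recover t "3" hpre h3']; decide)) h3
    rw [if_neg h3']
    by_cases hy' : PySem.Str.slice t (some 5) none = "y"
    · exact absurd (String.toList_inj.mp (by rw [pv_recover t "y" hpre hy']; decide)) hy
    rw [if_neg hy']
    by_cases hx' : PySem.Str.slice t (some 5) none = "x"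
    · exact absurd (String.toList_inj.mp (by rw [pv_recover t "x" hpre hx']; decide)) hx
    rw [if_neg hx']
  · rw [if_pos hpre]

-- ===== VERDICT (by name: the statement is the Claim_ definition above) =====
theorem find_product_description_spec : Claim_equal_find_product_description := by
  intro s _
  unfold Spec_find_product_description find_product_description find_product_description_alt
  exact pv_core (PySem.Str.lower (PySem.Str.replace s " " ""))
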